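-- pv_equiv track=rewrite | github.com/chullee123/learnPython | pythonScripts/MIT6.00.1x/unit1/alphabetString.py | getIfNext
-- ===== SOURCE A (Python) =====
-- def getIfNext(s, i, c = ""):
--     currentString = s[i]
--     c += currentString
--     if i+1 >= len(s):
--         return c
--     nextString = s[i+1]
--     if int(ord(currentString)) <= int(ord(nextString)):
--         i += 1
--         return getIfNext(s, i, c)
--     else:
--         return c
-- ===== SOURCE B (Python) =====
-- def getIfNext(s, i, c = ""):
--     # Iterative version: explicit while loop instead of tail recursion.
--     c += s[i]
--     while i + 1 < len(s) and ord(s[i]) <= ord(s[i + 1]):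
--         i += 1
--         c += s[i]
--     return c
-- ===== Notes on version B (the rewrite author's own statement) =====
-- stated objective: idiomatic
-- what changed: Replaces A's tail recursion (re-fetching the current character and passing the accumulator through each call) with a single explicit while loop that appends to the accumulator in place.
import Mathlib
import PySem

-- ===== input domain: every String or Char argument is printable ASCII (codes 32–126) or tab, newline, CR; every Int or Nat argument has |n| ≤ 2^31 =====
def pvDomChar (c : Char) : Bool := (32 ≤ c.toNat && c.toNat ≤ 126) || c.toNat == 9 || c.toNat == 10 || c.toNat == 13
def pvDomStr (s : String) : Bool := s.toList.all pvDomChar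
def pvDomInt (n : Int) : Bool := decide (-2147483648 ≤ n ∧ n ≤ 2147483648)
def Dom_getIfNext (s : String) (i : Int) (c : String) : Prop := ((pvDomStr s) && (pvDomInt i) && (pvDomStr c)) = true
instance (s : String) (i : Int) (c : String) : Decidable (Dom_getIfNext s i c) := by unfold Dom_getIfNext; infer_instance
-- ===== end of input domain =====

-- B replaces A's tail recursion by an explicit while loop (idiomatic; same O(n) scan, same return value).
-- Both ports carry a Nat fuel as a totality guard only; fuel 2*len+1 is never exhausted while the index is in range.

-- ===== PORT A =====
-- A's tail recursion over (s, i, c): fetch s[i], append it, stop at the end or at a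
-- descent, else recurse with i+1.  Works on List Char; getIfNext wraps String ↔ List Char.
def gRec (s : List Char) (fuel : Nat) (i : Int) (c : List Char) : List Char :=
  match fuel with
  | 0 => c             -- fuel exhausted: unreachable from getIfNext's initial fuel
  | fuel + 1 =>
    match PySem.List.pyGet? s i with
    | none => c        -- Python raises IndexError here; excluded by Pre_
    | some cur =>
      let c2 := c ++ [cur]
      if i + 1 ≥ (s.length : Int) then c2
      else
        match PySem.List.pyGet? s (i + 1) with
        | none => c2   -- unreachable under Pre_
        | some nxt =>
          if cur.toNat ≤ nxt.toNat then gRec s fuel (i + 1) c2 else c2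

def getIfNext (s : String) (i : Int) (c : String) : String :=
  String.ofList (gRec s.toList (2 * s.toList.length + 1) i c.toList)

-- ===== PORT B =====
-- B's while loop: while i+1 < len(s) and ord(s[i]) <= ord(s[i+1]): i += 1; c += s[i]
def gLoop (s : List Char) (fuel : Nat) (i : Int) (c : List Char) : List Char :=
  match fuel with
  | 0 => c             -- fuel exhausted: unreachable from getIfNext_alt's initial fuel
  | fuel + 1 =>
    if i + 1 < (s.length : Int) then
      match PySem.List.pyGet? s i, PySem.List.pyGet? s (i + 1) with
      | some a, some b =>
        if a.toNat ≤ b.toNat then gLoop s fuel (i + 1) (c ++ [b]) else c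
      | _, _ => c      -- unreachable under Pre_ (indices stay in range)
    else c

def getIfNext_alt (s : String) (i : Int) (c : String) : String :=
  match PySem.List.pyGet? s.toList i with
  | none => c          -- Python raises IndexError here; excluded by Pre_
  | some ch => String.ofList (gLoop s.toList (2 * s.toList.length + 1) i (c.toList ++ [ch]))

-- ===== PRECONDITION & SPEC =====
-- Pre_ excludes exactly the inputs where the Python A raises IndexError on s[i] (B raises there too).
def Pre_getIfNext (s : String) (i : Int) (c : String) : Prop :=
  PySem.Raise.InRange s.toList.length i
instance (s : String) (i : Int) (c : String) : Decidable (Pre_getIfNext s i c) := by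
  unfold Pre_getIfNext; infer_instance

def pvWitness_getIfNext : String × Int × String := ("abcab", 0, "")

def Spec_getIfNext (s : String) (i : Int) (c : String) (out : String) : Prop := out = getIfNext_alt s i c
instance (s : String) (i : Int) (c : String) (out : String) : Decidable (Spec_getIfNext s i c out) := by unfold Spec_getIfNext; infer_instance

-- ===== CLAIM (what is proved, stated in full; the proofs are below) =====
def Claim_equal_getIfNext : Prop := ∀ (s : String) (i : Int) (c : String), Dom_getIfNext s i c → Pre_getIfNext s i c → Spec_getIfNext s i c (getIfNext s i c)

-- ===== LEMMAS AND PROOFS =====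

-- Core invariant: with i in range, s[i] = cur and enough fuel, A's recursion from (i, c)
-- equals B's loop from (i, c ++ [cur]).
theorem gRec_eq_gLoop (s : List Char) (fuel : Nat) (i : Int) (c : List Char) (cur : Char)
    (hin : PySem.Raise.InRange s.length i)
    (hget : PySem.List.pyGet? s i = some cur)
    (hfuel : (s.length : Int) - i ≤ fuel) :
    gRec s fuel i c = gLoop s fuel i (c ++ [cur]) := by
  induction fuel generalizing i c cur with
  | zero =>
    exfalso
    have := hin.2
    omega
  | succ f ih =>
    rw [gRec, gLoop, hget]
    by_cases hend : i + 1 ≥ (s.length : Int)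
    · simp [hend, not_lt.mpr hend]
    · have hlt1 : i + 1 < (s.length : Int) := lt_of_not_ge hend
      have hin1 : PySem.Raise.InRange s.length (i + 1) := ⟨by have := hin.1; omega, hlt1⟩
      have hget1 : ∃ nxt, PySem.List.pyGet? s (i + 1) = some nxt := by
        rcases h : PySem.List.pyGet? s (i + 1) with _ | nxt
        · exact absurd ((PySem.List.pyGet?_eq_none_iff _ _).mp h) (not_not_intro hin1)
        · exact ⟨nxt, rfl⟩
      rcases hget1 with ⟨nxt, hnxt⟩
      rw [hnxt]
      simp only [hlt1, if_pos]
      by_cases hcmp : cur.toNat ≤ nxt.toNat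
      · simp only [hcmp, if_true]
        rw [ih (i + 1) (c ++ [cur]) nxt hin1 hnxt (by omega), List.append_assoc,
          if_neg hend]
      · simp [hcmp, hend]

-- ===== VERDICT (by name: the statement is the Claim_ definition above) =====
theorem getIfNext_spec : Claim_equal_getIfNext := by
  intro s i c _hdom hpre
  unfold Spec_getIfNext getIfNext getIfNext_alt
  rcases h : PySem.List.pyGet? s.toList i with _ | cur
  · exact absurd ((PySem.List.pyGet?_eq_none_iff _ _).mp h) (not_not_intro hpre)
  · rw [gRec_eq_gLoop s.toList _ i c.toList cur hpre h (by rcases hpre with ⟨h1, h2⟩; push_cast; omega)]
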